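-- pv_equiv track=rewrite | github.com/robertflores17/fixthevuln | scripts/inject_store_ctas.py | _vendor_for_pid
-- ===== SOURCE A (Python) =====
-- def _vendor_for_pid(pid):
--     """Determine vendor from product ID."""
--     vendor_prefixes = {
--         'comptia-': 'comptia', 'isc2-': 'isc2', 'aws-': 'aws', 'ms-': 'microsoft',
--         'cisco-': 'cisco', 'isaca-': 'isaca', 'giac-': 'giac', 'google-': 'google',
--         'ec-': 'ec-council', 'offsec-': 'offsec', 'hashicorp-': 'hashicorp', 'k8s-': 'k8s',
--     }
--     for prefix, vendor in vendor_prefixes.items():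
--         if pid.startswith(prefix):
--             return vendor
--     return None
-- ===== SOURCE B (Python) =====
-- def _vendor_for_pid(pid):
--     """Determine vendor from product ID."""
--     head, sep, _ = pid.partition('-')
--     if sep != '-':
--         return None
--     if head == 'ms':
--         return 'microsoft'
--     if head == 'ec':
--         return 'ec-council'
--     if head in ('comptia', 'isc2', 'aws', 'cisco', 'isaca', 'giac', 'google',
--                 'offsec', 'hashicorp', 'k8s'):
--         return head
--     return None
-- ===== Notes on version B (the rewrite author's own statement) =====
-- stated objective: idiomatic
-- what changed: Instead of looping over twelve dashed prefixes with startswith, B partitions the id at the first dash once and classifies the bare head token: two explicit renames (ms->microsoft, ec->ec-council) and a membership test on the tokens whose vendor name equals the token itself, so no prefix table is scanned and no key/value dict exists at all.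
import Mathlib
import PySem

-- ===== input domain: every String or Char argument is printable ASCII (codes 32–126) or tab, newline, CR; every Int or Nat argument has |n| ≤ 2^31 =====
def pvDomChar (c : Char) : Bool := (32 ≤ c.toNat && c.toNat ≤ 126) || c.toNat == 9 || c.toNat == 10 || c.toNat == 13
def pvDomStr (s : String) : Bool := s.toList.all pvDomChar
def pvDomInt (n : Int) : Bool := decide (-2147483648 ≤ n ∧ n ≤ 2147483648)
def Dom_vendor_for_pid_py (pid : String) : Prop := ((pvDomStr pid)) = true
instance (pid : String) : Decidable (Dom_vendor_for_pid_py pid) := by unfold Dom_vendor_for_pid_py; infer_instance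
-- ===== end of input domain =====

-- B replaces A's loop of twelve startswith tests with one partition('-') and a classification
-- of the bare head token (two renames + an identity-token membership test); idiomatic, no table scan.

-- ===== PORT A =====
-- the literal vendor_prefixes dict of A, in insertion order
def vendorPrefixes : List (String × String) :=
  [("comptia-", "comptia"), ("isc2-", "isc2"), ("aws-", "aws"), ("ms-", "microsoft"),
   ("cisco-", "cisco"), ("isaca-", "isaca"), ("giac-", "giac"), ("google-", "google"),
   ("ec-", "ec-council"), ("offsec-", "offsec"), ("hashicorp-", "hashicorp"), ("k8s-", "k8s")]

-- the for-loop with early return: the first matching prefix's vendor, else None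
def vendor_for_pid_py (pid : String) : Option String :=
  (vendorPrefixes.find? (fun pv => PySem.Str.startswith pid pv.1)).map (·.2)

-- ===== PORT B =====
-- the tokens whose vendor name is the token itself ('head in (...)' of Source B)
def vendorIdentityTokens : List String :=
  ["comptia", "isc2", "aws", "cisco", "isaca", "giac", "google", "offsec", "hashicorp", "k8s"]

-- head, sep, _ = pid.partition('-'); require sep == '-'; then two renames, else identity membership
def vendor_for_pid_py_alt (pid : String) : Option String :=
  let cs := pid.toList
  let head := String.ofList (cs.takeWhile (fun c => !(c == '-')))
  if cs.contains '-' then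
    if head = "ms" then some "microsoft"
    else if head = "ec" then some "ec-council"
    else if vendorIdentityTokens.contains head then some head
    else none
  else none

-- ===== PRECONDITION & SPEC =====
def Spec_vendor_for_pid_py (pid : String) (out : Option String) : Prop := out = vendor_for_pid_py_alt pid
instance (pid : String) (out : Option String) : Decidable (Spec_vendor_for_pid_py pid out) := by unfold Spec_vendor_for_pid_py; infer_instance

-- ===== CLAIM (what is proved, stated in full; the proofs are below) =====
def Claim_equal_vendor_for_pid_py : Prop := ∀ (pid : String), Dom_vendor_for_pid_py pid → Spec_vendor_for_pid_py pid (vendor_for_pid_py pid)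

-- ===== LEMMAS AND PROOFS =====

-- a prefix of shape t++['-'] (no '-' inside t) is exactly: the text before the first '-' is t, and a '-' occurs
lemma takeWhile_prefix_dash (t : List Char) (ht : '-' ∉ t) (l : List Char) :
    (t ++ ['-']) <+: l ↔ (l.takeWhile (fun c => c ≠ '-') = t ∧ '-' ∈ l) := by
  induction t generalizing l with
  | nil =>
    cases l with
    | nil => simp
    | cons a l' =>
      by_cases ha : a = '-'
      · subst ha; simp
      · simp [ha, List.cons_prefix_cons]
        intro h; exact absurd h.symm ha
  | cons x t' ih =>
    have hx : x ≠ '-' := fun e => ht (e ▸ List.mem_cons_self)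
    have ht' : '-' ∉ t' := fun m => ht (List.mem_cons_of_mem _ m)
    cases l with
    | nil => simp
    | cons a l' =>
      by_cases hax : a = x
      · subst hax
        rw [List.cons_append, List.cons_prefix_cons]
        constructor
        · rintro ⟨-, h⟩
          have h' := (ih ht' l').mp h
          refine ⟨?_, List.mem_cons_of_mem _ h'.2⟩
          rw [List.takeWhile_cons, if_pos (by simp [hx]), h'.1]
        · rintro ⟨h1, h2⟩
          rw [List.takeWhile_cons, if_pos (by simp [hx])] at h1
          have h1' : List.takeWhile (fun c => decide (c ≠ '-')) l' = t' := (List.cons.injEq .. ▸ h1).2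
          have h2' : '-' ∈ l' := by
            rcases List.mem_cons.mp h2 with e | m
            · exact absurd e.symm hx
            · exact m
          exact ⟨rfl, (ih ht' l').mpr ⟨h1', h2'⟩⟩
      · constructor
        · rintro h
          rw [List.cons_append, List.cons_prefix_cons] at h
          exact absurd h.1.symm hax
        · rintro ⟨h1, h2⟩
          exfalso
          rw [List.takeWhile_cons] at h1
          split_ifs at h1 with hd
          · exact hax (List.cons.injEq .. ▸ h1).1

-- ===== VERDICT (by name: the statement is the Claim_ definition above) =====
theorem vendor_for_pid_py_spec : Claim_equal_vendor_for_pid_py := by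
  intro pid _
  unfold Spec_vendor_for_pid_py vendor_for_pid_py vendor_for_pid_py_alt
  by_cases hm : '-' ∈ pid.toList
  · -- a dash occurs: each startswith test is 'text before the first dash = that token'
    have hP : (fun c : Char => !(c == '-')) = (fun c : Char => decide (c ≠ '-')) := by
      funext c; by_cases h : c = '-' <;> simp [h]
    have hcond : ∀ (p tok : String), p.toList = tok.toList ++ ['-'] → '-' ∉ tok.toList →
        PySem.Str.startswith pid p
          = decide (pid.toList.takeWhile (fun c => !(c == '-')) = tok.toList) := by
      intro p tok hp htok
      rw [hP]
      by_cases hq : pid.toList.takeWhile (fun c => c ≠ '-') = tok.toList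
      · have hpre : (tok.toList ++ ['-']) <+: pid.toList :=
          (takeWhile_prefix_dash _ htok _).mpr ⟨hq, hm⟩
        rw [PySem.Str.startswith_eq, hp, decide_eq_true hq]
        exact (PySem.Chars.startswith_iff _ _).mpr hpre
      · have hnpre : ¬ (tok.toList ++ ['-']) <+: pid.toList := fun c =>
          hq ((takeWhile_prefix_dash _ htok _).mp c).1
        rw [PySem.Str.startswith_eq, hp, decide_eq_false hq]
        exact Bool.eq_false_iff.mpr (fun c => hnpre ((PySem.Chars.startswith_iff _ _).mp c))
    have hct : pid.toList.contains '-' = true := by simpa using hm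
    simp only [vendorPrefixes, List.find?_cons, hct, if_true,
      hcond "comptia-" "comptia" (by decide) (by decide),
      hcond "isc2-" "isc2" (by decide) (by decide),
      hcond "aws-" "aws" (by decide) (by decide),
      hcond "ms-" "ms" (by decide) (by decide),
      hcond "cisco-" "cisco" (by decide) (by decide),
      hcond "isaca-" "isaca" (by decide) (by decide),
      hcond "giac-" "giac" (by decide) (by decide),
      hcond "google-" "google" (by decide) (by decide),
      hcond "ec-" "ec" (by decide) (by decide),
      hcond "offsec-" "offsec" (by decide) (by decide),
      hcond "hashicorp-" "hashicorp" (by decide) (by decide),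
      hcond "k8s-" "k8s" (by decide) (by decide)]
    by_cases h1 : pid.toList.takeWhile (fun c => !(c == '-')) = ['c','o','m','p','t','i','a']
    · simp [h1, vendorIdentityTokens]
    by_cases h2 : pid.toList.takeWhile (fun c => !(c == '-')) = ['i','s','c','2']
    · simp [h2, vendorIdentityTokens]
    by_cases h3 : pid.toList.takeWhile (fun c => !(c == '-')) = ['a','w','s']
    · simp [h3, vendorIdentityTokens]
    by_cases h4 : pid.toList.takeWhile (fun c => !(c == '-')) = ['m','s']
    · simp [h4]
    by_cases h5 : pid.toList.takeWhile (fun c => !(c == '-')) = ['c','i','s','c','o']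
    · simp [h5, vendorIdentityTokens]
    by_cases h6 : pid.toList.takeWhile (fun c => !(c == '-')) = ['i','s','a','c','a']
    · simp [h6, vendorIdentityTokens]
    by_cases h7 : pid.toList.takeWhile (fun c => !(c == '-')) = ['g','i','a','c']
    · simp [h7, vendorIdentityTokens]
    by_cases h8 : pid.toList.takeWhile (fun c => !(c == '-')) = ['g','o','o','g','l','e']
    · simp [h8, vendorIdentityTokens]
    by_cases h9 : pid.toList.takeWhile (fun c => !(c == '-')) = ['e','c']
    · simp [h9]
    by_cases h10 : pid.toList.takeWhile (fun c => !(c == '-')) = ['o','f','f','s','e','c']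
    · simp [h10, vendorIdentityTokens]
    by_cases h11 : pid.toList.takeWhile (fun c => !(c == '-')) = ['h','a','s','h','i','c','o','r','p']
    · simp [h11, vendorIdentityTokens]
    by_cases h12 : pid.toList.takeWhile (fun c => !(c == '-')) = ['k','8','s']
    · simp [h12, vendorIdentityTokens]
    · -- no token matches: both sides are none
      have hne : ∀ (t : List Char), pid.toList.takeWhile (fun c => !(c == '-')) ≠ t →
          (String.ofList (pid.toList.takeWhile (fun c => !(c == '-'))) = String.ofList t) = False := by
        intro t h
        simp only [eq_iff_iff, iff_false]
        intro q
        exact h (by simpa using congrArg String.toList q)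
      simp [h1, h2, h3, h4, h5, h6, h7, h8, h9, h10, h11, h12, vendorIdentityTokens,
        show ("ms" : String) = String.ofList ['m','s'] from rfl,
        show ("ec" : String) = String.ofList ['e','c'] from rfl,
        show ("comptia" : String) = String.ofList ['c','o','m','p','t','i','a'] from rfl,
        show ("isc2" : String) = String.ofList ['i','s','c','2'] from rfl,
        show ("aws" : String) = String.ofList ['a','w','s'] from rfl,
        show ("cisco" : String) = String.ofList ['c','i','s','c','o'] from rfl,
        show ("isaca" : String) = String.ofList ['i','s','a','c','a'] from rfl,
        show ("giac" : String) = String.ofList ['g','i','a','c'] from rfl,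
        show ("google" : String) = String.ofList ['g','o','o','g','l','e'] from rfl,
        show ("offsec" : String) = String.ofList ['o','f','f','s','e','c'] from rfl,
        show ("hashicorp" : String) = String.ofList ['h','a','s','h','i','c','o','r','p'] from rfl,
        show ("k8s" : String) = String.ofList ['k','8','s'] from rfl,
        hne _ h1, hne _ h2, hne _ h3, hne _ h4, hne _ h5, hne _ h6,
        hne _ h7, hne _ h8, hne _ h9, hne _ h10, hne _ h11, hne _ h12]
  · -- no dash: no prefix can match (each carries a '-'), and B's gate is false
    have hfind : vendorPrefixes.find? (fun pv => PySem.Chars.startswith pid.toList pv.1.toList) = none := by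
      apply List.find?_eq_none.mpr
      intro pv hpv hs
      have hp : pv.1.toList <+: pid.toList := (PySem.Chars.startswith_iff _ _).mp hs
      have hd : '-' ∈ pv.1.toList := by fin_cases hpv <;> decide
      exact hm (hp.subset hd)
    simp [hfind, hm]
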